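-- pv_equiv track=rewrite | github.com/exastro-suite/exastro-it-automation | ita_root/common_libs/ansible_driver/classes/CheckAnsibleRoleFiles.py | childRole
-- ===== SOURCE A (Python) =====
-- def childRole(data, DirList):
--
--     """
--     処理内容
--       roleディレクトリとして扱うかを判定
--       taskディレクトリがあるディレクトリをroleディレクトリとして扱う
--       roles
--         nest_dir1
--           sample_role1
--             tasks
--             default
--         nest_dir2
--           sample_role2
--             tasks
--             default
--             sample_role3
--               tasks
--      但し、tasksディレクトリがネストしているような階層のroleディレクトリは除外する。
--      sample_role3は除外
--
--     パラメータ
--       data:        roleディレクトリ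
--       RoleDirList: rolesディレクトリ配下のtasksが定義されているディレクトリ一覧
--     戻り値
--       true:   roleディレクトリとして扱わない。
--       false:  roleディレクトリとして扱う。
--     """
--
--     data = '%s/' % (data)
--     for dirs in DirList:
--         dirs = '%s/' % (dirs)
--
--         # 完全一致はスキップ(自分自身)
--         if data == dirs:
--             continue
--
--         # 前方一致は除外
--         if data.startswith(dirs):
--             return False
--
--     return True
-- ===== SOURCE B (Python) =====
-- def childRole(data, DirList):
--     prefixes = {'%s/' % d for d in DirList}
--     t = '%s/' % data
--     n = len(t)
--     for i, c in enumerate(t):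
--         if c == '/' and i + 1 < n:
--             if t[:i+1] in prefixes:
--                 return False
--     return True
-- ===== Notes on version B (the rewrite author's own statement) =====
-- stated objective: idiomatic
-- what changed: Instead of scanning DirList and testing startswith for each entry, B builds a hash set of 'dir/' strings once and enumerates the proper '/'-boundary prefixes of data+'/', answering with set membership.
import Mathlib
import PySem

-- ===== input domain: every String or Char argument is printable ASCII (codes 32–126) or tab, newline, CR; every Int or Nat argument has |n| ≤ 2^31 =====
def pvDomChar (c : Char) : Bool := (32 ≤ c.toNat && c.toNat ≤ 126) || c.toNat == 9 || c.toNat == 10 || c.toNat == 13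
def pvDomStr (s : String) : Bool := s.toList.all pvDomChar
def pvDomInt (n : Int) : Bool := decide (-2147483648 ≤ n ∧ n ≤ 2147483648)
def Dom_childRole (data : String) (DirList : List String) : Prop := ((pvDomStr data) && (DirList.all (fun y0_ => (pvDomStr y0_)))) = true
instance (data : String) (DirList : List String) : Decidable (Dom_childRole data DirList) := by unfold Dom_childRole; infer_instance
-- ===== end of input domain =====

-- B replaces A's per-entry startswith scan by a hash set of 'dir/' strings and a walk over
-- the '/'-boundary proper prefixes of data+'/' (idiomatic; same results everywhere).

-- ===== PORT A =====
-- the for-loop over DirList with early return False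
def childRoleLoopA (t : List Char) : List String → Bool
  | [] => true
  | d :: rest =>
    let ds := d.toList ++ ['/']
    if t = ds then childRoleLoopA t rest
    else if PySem.Chars.startswith t ds then false
    else childRoleLoopA t rest

def childRole (data : String) (DirList : List String) : Bool :=
  childRoleLoopA (data.toList ++ ['/']) DirList

-- ===== PORT B =====
-- the for-loop over enumerate(t) with early return False
def childRoleLoopB (t : List Char) (S : PySem.Set (List Char)) : List (Int × Char) → Bool
  | [] => true
  | (i, c) :: rest =>
    if c = '/' ∧ i + 1 < (t.length : Int) then
      if PySem.List.slice t none (some (i + 1)) ∈ S then false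
      else childRoleLoopB t S rest
    else childRoleLoopB t S rest

def childRole_alt (data : String) (DirList : List String) : Bool :=
  let S : PySem.Set (List Char) := PySem.Set.ofList (DirList.map (fun d => d.toList ++ ['/']))
  let t := data.toList ++ ['/']
  childRoleLoopB t S (PySem.List.enumerate t 0)

-- ===== PRECONDITION & SPEC =====
def Spec_childRole (data : String) (DirList : List String) (out : Bool) : Prop := out = childRole_alt data DirList
instance (data : String) (DirList : List String) (out : Bool) : Decidable (Spec_childRole data DirList out) := by unfold Spec_childRole; infer_instance

-- ===== CLAIM (what is proved, stated in full; the proofs are below) =====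
def Claim_equal_childRole : Prop := ∀ (data : String) (DirList : List String), Dom_childRole data DirList → Spec_childRole data DirList (childRole data DirList)

-- ===== LEMMAS AND PROOFS =====

theorem loopA_eq_false_iff (t : List Char) (L : List String) :
    childRoleLoopA t L = false ↔ ∃ d ∈ L, t ≠ d.toList ++ ['/'] ∧ (d.toList ++ ['/']) <+: t := by
  induction L with
  | nil => simp [childRoleLoopA]
  | cons d rest ih =>
    simp only [childRoleLoopA]
    by_cases h : t = d.toList ++ ['/']
    · rw [if_pos h, ih]
      constructor
      · rintro ⟨x, hx, hne, hp⟩; exact ⟨x, List.mem_cons_of_mem _ hx, hne, hp⟩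
      · rintro ⟨x, hx, hne, hp⟩
        rcases List.mem_cons.mp hx with rfl | hx
        · exact absurd h hne
        · exact ⟨x, hx, hne, hp⟩
    · by_cases hs : PySem.Chars.startswith t (d.toList ++ ['/']) = true
      · rw [if_neg h, if_pos hs]
        exact iff_of_true rfl ⟨d, List.mem_cons_self, h, (PySem.Chars.startswith_iff _ _).mp hs⟩
      · have hnp : ¬ (d.toList ++ ['/']) <+: t := fun hp =>
          hs ((PySem.Chars.startswith_iff _ _).mpr hp)
        rw [if_neg h, if_neg hs, ih]
        constructor
        · rintro ⟨x, hx, hne, hp⟩; exact ⟨x, List.mem_cons_of_mem _ hx, hne, hp⟩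
        · rintro ⟨x, hx, hne, hp⟩
          rcases List.mem_cons.mp hx with rfl | hx
          · exact absurd hp hnp
          · exact ⟨x, hx, hne, hp⟩

theorem loopB_eq_false_iff (t : List Char) (S : PySem.Set (List Char)) (l : List (Int × Char)) :
    childRoleLoopB t S l = false ↔
      ∃ p ∈ l, (p.2 = '/' ∧ p.1 + 1 < (t.length : Int)) ∧
        PySem.List.slice t none (some (p.1 + 1)) ∈ S := by
  induction l with
  | nil => simp [childRoleLoopB]
  | cons p rest ih =>
    obtain ⟨i, c⟩ := p
    simp only [childRoleLoopB]
    by_cases h : c = '/' ∧ i + 1 < (t.length : Int)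
    · rw [if_pos h]
      by_cases hm : PySem.List.slice t none (some (i + 1)) ∈ S
      · rw [if_pos hm]
        exact iff_of_true rfl ⟨(i, c), List.mem_cons_self, h, hm⟩
      · rw [if_neg hm, ih]
        constructor
        · rintro ⟨q, hq, hc, hS⟩; exact ⟨q, List.mem_cons_of_mem _ hq, hc, hS⟩
        · rintro ⟨q, hq, hc, hS⟩
          rcases List.mem_cons.mp hq with rfl | hq
          · exact absurd hS hm
          · exact ⟨q, hq, hc, hS⟩
    · rw [if_neg h, ih]
      constructor
      · rintro ⟨q, hq, hc, hS⟩; exact ⟨q, List.mem_cons_of_mem _ hq, hc, hS⟩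
      · rintro ⟨q, hq, hc, hS⟩
        rcases List.mem_cons.mp hq with rfl | hq
        · exact absurd hc h
        · exact ⟨q, hq, hc, hS⟩

-- the bridge: '/'-boundary proper prefixes of t that lie in S ↔ some 'd/' is a proper prefix of t
theorem bridge (data : String) (DirList : List String) :
    (∃ p ∈ PySem.List.enumerate (data.toList ++ ['/']) 0,
        (p.2 = '/' ∧ p.1 + 1 < ((data.toList ++ ['/']).length : Int)) ∧
        PySem.List.slice (data.toList ++ ['/']) none (some (p.1 + 1)) ∈
          PySem.Set.ofList (DirList.map (fun d => d.toList ++ ['/']))) ↔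
      ∃ d ∈ DirList, (data.toList ++ ['/']) ≠ d.toList ++ ['/'] ∧
        (d.toList ++ ['/']) <+: (data.toList ++ ['/']) := by
  set t := data.toList ++ ['/'] with ht
  constructor
  · rintro ⟨p, hmem, ⟨hc, hlt⟩, hS⟩
    rw [PySem.List.mem_enumerate_iff] at hmem
    obtain ⟨k, hk, rfl⟩ := hmem
    simp only [zero_add] at hc hlt hS ⊢
    have hklt : k + 1 < t.length := by exact_mod_cast hlt
    have hslice : PySem.List.slice t none (some ((k : Int) + 1)) = t.take (k + 1) := by
      have : ((k : Int) + 1) = ((k + 1 : Nat) : Int) := by push_cast; ring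
      rw [this, PySem.List.slice_to_natCast]
    rw [hslice] at hS
    rw [PySem.Set.mem_ofList, List.mem_map] at hS
    obtain ⟨d, hd, hds⟩ := hS
    refine ⟨d, hd, ?_, ?_⟩
    · intro heq
      have : (d.toList ++ ['/']).length = t.length := by rw [← heq]
      rw [hds] at this
      simp [List.length_take] at this
      omega
    · rw [hds]; exact List.take_prefix _ _
  · rintro ⟨d, hd, hne, hpre⟩
    set ds := d.toList ++ ['/'] with hds
    have hlen : ds.length ≤ t.length := hpre.length_le
    have hpos : 0 < ds.length := by simp [hds]
    have hlt : ds.length < t.length := by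
      rcases lt_or_eq_of_le hlen with h | h
      · exact h
      · exact absurd (hpre.eq_of_length h).symm hne
    set k := ds.length - 1 with hk
    have hkt : k < t.length := by omega
    have hkd : k = d.toList.length := by simp [hk, hds]
    have htk : t[k]'hkt = '/' := by
      obtain ⟨r, hr⟩ := hpre
      have h1 : t[k]'hkt = (ds ++ r)[k]'(by rw [hr]; exact hkt) := by simp [hr]
      rw [h1, List.getElem_append_left (by omega)]
      simp [hds, hkd]
    refine ⟨((k : Int), t[k]'hkt), ?_, ⟨htk, ?_⟩, ?_⟩
    · rw [PySem.List.mem_enumerate_iff]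
      exact ⟨k, hkt, by simp⟩
    · simp only; omega
    · have hslice : PySem.List.slice t none (some ((k : Int) + 1)) = t.take (k + 1) := by
        have : ((k : Int) + 1) = ((k + 1 : Nat) : Int) := by push_cast; ring
        rw [this, PySem.List.slice_to_natCast]
      simp only [hslice]
      rw [PySem.Set.mem_ofList, List.mem_map]
      refine ⟨d, hd, ?_⟩
      have hk1 : k + 1 = ds.length := by omega
      rw [hk1, ← List.prefix_iff_eq_take.mp hpre]

-- ===== VERDICT (by name: the statement is the Claim_ definition above) =====
theorem childRole_spec : Claim_equal_childRole := by
  intro data DirList _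
  unfold Spec_childRole childRole childRole_alt
  simp only []
  have hA := loopA_eq_false_iff (data.toList ++ ['/']) DirList
  have hB := (loopB_eq_false_iff (data.toList ++ ['/'])
      (PySem.Set.ofList (DirList.map (fun d => d.toList ++ ['/'])))
      (PySem.List.enumerate (data.toList ++ ['/']) 0)).trans (bridge data DirList)
  have h := hA.trans hB.symm
  cases hx : childRoleLoopA (data.toList ++ ['/']) DirList <;>
    cases hy : childRoleLoopB (data.toList ++ ['/'])
      (PySem.Set.ofList (DirList.map (fun d => d.toList ++ ['/'])))
      (PySem.List.enumerate (data.toList ++ ['/']) 0) <;> simp_all
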